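-- pv_equiv track=rewrite | github.com/ShaharEli/algoTrain | 2020CA/2020CA.py | seq_fib
-- ===== SOURCE A (Python) =====
-- def seq_fib(n, t, k):
--     if n < t-1:
--         return 0
--     if n == t-1:
--         return k
--     summ = 0
--     for i in range(1, t+1):
--         summ += seq_fib(n-i, t, k)
--     return summ
-- ===== SOURCE B (Python) =====
-- def seq_fib(n, t, k):
--     if n < t - 1:
--         return 0
--     if n == t - 1:
--         return k
--     if t <= 0:
--         return 0
--     window = [0] * (t - 1) + [k]   # values at indices n-t .. n-1 relative to the next term
--     s = k                          # running sum of window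
--     for _ in range(t, n + 1):
--         cur = s                    # next term = sum of previous t terms
--         s += cur - window[0]
--         window = window[1:] + [cur]
--     return window[-1]
-- ===== Notes on version B (the rewrite author's own statement) =====
-- stated objective: alternative
-- what changed: Replaced A's t-ary recursion with a bottom-up loop that keeps a sliding window of the last t sequence values and their running sum; Pre_ excludes exactly the inputs (t >= 1, n >= t + 997) on which A raises RecursionError under Python's default recursion limit.
import Mathlib
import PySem

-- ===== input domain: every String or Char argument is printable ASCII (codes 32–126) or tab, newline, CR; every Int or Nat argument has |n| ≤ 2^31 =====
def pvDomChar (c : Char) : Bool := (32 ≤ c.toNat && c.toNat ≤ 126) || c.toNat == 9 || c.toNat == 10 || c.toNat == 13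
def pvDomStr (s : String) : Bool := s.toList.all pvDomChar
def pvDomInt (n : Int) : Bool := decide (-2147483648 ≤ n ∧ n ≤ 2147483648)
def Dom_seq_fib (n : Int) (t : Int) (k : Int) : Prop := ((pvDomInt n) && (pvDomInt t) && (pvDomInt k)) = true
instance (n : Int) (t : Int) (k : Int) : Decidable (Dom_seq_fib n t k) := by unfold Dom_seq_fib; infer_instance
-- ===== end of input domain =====

-- B replaces A's t-ary recursion by a bottom-up loop keeping a sliding window of the
-- last t values plus their running sum; same return value on every input.

-- ===== PORT A =====
def seq_fib (n : Int) (t : Int) (k : Int) : Int :=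
  if _h1 : n < t - 1 then 0
  else if _h2 : n = t - 1 then k
  else
    -- summ = 0; for i in range(1, t+1): summ += seq_fib(n-i, t, k)
    (PySem.List.pyRange 1 (t + 1) 1).attach.foldl
      (fun summ i => summ + seq_fib (n - i.1) t k) 0
termination_by (n - t + 2).toNat
decreasing_by
  have h := (PySem.List.mem_pyRange_one).1 i.2
  omega

-- ===== PORT B =====
-- window[0] is ported as pyGetD _ 0 0: the window always has length t ≥ 1 on this
-- branch, so the Python indexing never raises and the default is never used.
def seq_fib_alt (n : Int) (t : Int) (k : Int) : Int :=
  if n < t - 1 then 0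
  else if n = t - 1 then k
  else if t ≤ 0 then 0
  else
    let st := (PySem.List.pyRange t (n + 1) 1).foldl
      (fun (ws : List Int × Int) _ =>
        let cur := ws.2
        let s := ws.2 + (cur - PySem.List.pyGetD ws.1 0 0)
        (PySem.List.slice ws.1 (some 1) none ++ [cur], s))
      (List.replicate (t - 1).toNat 0 ++ [k], k)
    PySem.List.pyGetD st.1 (-1) 0

-- ===== PRECONDITION & SPEC =====
-- A recurses on n-1 first, so its recursion depth is n-t+2 for every t >= 1; with
-- Python's default recursion limit 1000 it raises RecursionError exactly when
-- t >= 1 and n >= t + 997 (measured: n = t+996 returns, n = t+997 raises).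
-- Pre_ excludes exactly those raising inputs and nothing else.
def Pre_seq_fib (n : Int) (t : Int) (k : Int) : Prop := t ≤ 0 ∨ n ≤ t + 996
instance (n : Int) (t : Int) (k : Int) : Decidable (Pre_seq_fib n t k) := by unfold Pre_seq_fib; infer_instance
def pvWitness_seq_fib : Int × Int × Int := (7, 2, 3)
def Spec_seq_fib (n : Int) (t : Int) (k : Int) (out : Int) : Prop := out = seq_fib_alt n t k
instance (n : Int) (t : Int) (k : Int) (out : Int) : Decidable (Spec_seq_fib n t k out) := by unfold Spec_seq_fib; infer_instance

-- ===== CLAIM (what is proved, stated in full; the proofs are below) =====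
def Claim_equal_seq_fib : Prop := ∀ (n : Int) (t : Int) (k : Int), Dom_seq_fib n t k → Pre_seq_fib n t k → Spec_seq_fib n t k (seq_fib n t k)

-- ===== LEMMAS AND PROOFS =====

theorem seq_fib_base_lt {n t k : Int} (h : n < t - 1) : seq_fib n t k = 0 := by
  rw [seq_fib]; simp [h]

theorem seq_fib_base_eq {t k : Int} : seq_fib (t - 1) t k = k := by
  rw [seq_fib]; simp

-- generic index shift for the sum of g over a window of length b
theorem sum_map_shift (g : Int → Int) (a : Int) (b : Nat) :
    ((PySem.List.pyRange 1 ((b : Int) + 1) 1).map (fun i => g (a - i))).sum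
      = ((PySem.List.pyRange (a - b) a 1).map g).sum := by
  induction b with
  | zero => simp [PySem.List.pyRange_one_eq_nil]
  | succ b ih =>
      have h1 : ((b + 1 : Nat) : Int) + 1 = ((b : Int) + 1) + 1 := by push_cast; ring
      have h2 : a - ((b + 1 : Nat) : Int) + 1 = a - (b : Nat) := by push_cast; ring
      rw [h1, PySem.List.pyRange_one_succ_right (by omega),
        PySem.List.pyRange_one_cons (a := a - ((b + 1 : Nat) : Int)) (b := a) (by omega), h2]
      simp only [List.map_append, List.map_cons, List.map_nil, List.sum_append,
        List.sum_cons, List.sum_nil, add_zero]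
      rw [ih]
      push_cast
      ring

-- recurrence: for t ≥ 1 and m ≥ t, seq_fib m = sum of the previous t values
theorem seq_fib_rec {t k : Int} (ht : 1 ≤ t) {m : Int} (hm : t ≤ m) :
    seq_fib m t k = ((PySem.List.pyRange (m - t) m 1).map (fun i => seq_fib i t k)).sum := by
  rw [seq_fib, dif_neg (by omega), dif_neg (by omega)]
  have h := sum_map_shift (fun i => seq_fib i t k) m t.toNat
  rw [Int.toNat_of_nonneg (by omega)] at h
  rw [← h]
  simp [PySem.List.foldl_add]

-- the ideal window contents before computing index j+1: the values at indices j+1-t .. j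
def fwin (t k j : Int) : List Int :=
  (PySem.List.pyRange (j + 1 - t) (j + 1) 1).map (fun i => seq_fib i t k)

theorem fwin_init {t k : Int} (ht : 1 ≤ t) :
    fwin t k (t - 1) = List.replicate (t - 1).toNat 0 ++ [k] := by
  unfold fwin
  have hsplit : PySem.List.pyRange (t - 1 + 1 - t) (t - 1 + 1) 1
      = PySem.List.pyRange 0 (t - 1) 1 ++ [t - 1] := by
    rw [show t - 1 + 1 - t = (0 : Int) by ring]
    have h := PySem.List.pyRange_one_succ_right (a := (0 : Int)) (b := t - 1) (by omega)
    rw [show t - 1 + 1 = t by ring] at h ⊢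
    rw [show (t : Int) = t - 1 + 1 by ring] at h ⊢
    exact h
  rw [hsplit, List.map_append]
  congr 1
  · rw [List.eq_replicate_iff]
    refine ⟨by simp [PySem.List.length_pyRange_one], ?_⟩
    intro b hb
    simp only [List.mem_map] at hb
    obtain ⟨i, hi, rfl⟩ := hb
    have := (PySem.List.mem_pyRange_one).1 hi
    exact seq_fib_base_lt (by omega)
  · simp [seq_fib_base_eq]

theorem fwin_shift {t k : Int} (ht : 1 ≤ t) {j : Int} (hj : t - 1 ≤ j) :
    (PySem.List.slice (fwin t k j) (some 1) none ++ [(fwin t k j).sum],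
      (fwin t k j).sum + ((fwin t k j).sum - PySem.List.pyGetD (fwin t k j) 0 0))
    = (fwin t k (j + 1), (fwin t k (j + 1)).sum) := by
  have hcons : fwin t k j
      = seq_fib (j + 1 - t) t k
        :: (PySem.List.pyRange (j + 2 - t) (j + 1) 1).map (fun i => seq_fib i t k) := by
    unfold fwin
    rw [PySem.List.pyRange_one_cons (by omega), List.map_cons,
      show j + 1 - t + 1 = j + 2 - t by ring]
  have hsum : (fwin t k j).sum = seq_fib (j + 1) t k :=
    (seq_fib_rec ht (by omega : t ≤ j + 1)).symm
  have hnext : fwin t k (j + 1)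
      = (PySem.List.pyRange (j + 2 - t) (j + 1) 1).map (fun i => seq_fib i t k)
        ++ [seq_fib (j + 1) t k] := by
    unfold fwin
    rw [show j + 1 + 1 - t = j + 2 - t by ring,
      PySem.List.pyRange_one_succ_right (by omega : j + 2 - t ≤ j + 1), List.map_append,
      List.map_singleton]
  simp only [Prod.mk.injEq]
  refine ⟨?_, ?_⟩
  · rw [hnext, hsum, hcons, PySem.List.slice_from_one, List.tail_cons]
  · rw [hnext, List.sum_append, List.sum_cons, List.sum_nil, add_zero, hsum, hcons,
      PySem.List.pyGetD_zero_cons]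
    have h2 := hsum
    rw [hcons, List.sum_cons] at h2
    linarith

theorem loop_inv {t k : Int} (ht : 1 ≤ t) (m : Nat) :
    ((PySem.List.pyRange t (t - 1 + (m : Int) + 1) 1).foldl
      (fun (ws : List Int × Int) _ =>
        let cur := ws.2
        let s := ws.2 + (cur - PySem.List.pyGetD ws.1 0 0)
        (PySem.List.slice ws.1 (some 1) none ++ [cur], s))
      (List.replicate (t - 1).toNat 0 ++ [k], k))
    = (fwin t k (t - 1 + (m : Int)), (fwin t k (t - 1 + (m : Int))).sum) := by
  induction m with
  | zero =>
      rw [show t - 1 + ((0 : Nat) : Int) + 1 = t by push_cast; ring,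
        PySem.List.pyRange_one_eq_nil (by omega), List.foldl_nil]
      rw [show t - 1 + ((0 : Nat) : Int) = t - 1 by push_cast; ring, fwin_init ht]
      simp
  | succ m ih =>
      rw [show t - 1 + ((m + 1 : Nat) : Int) + 1 = (t - 1 + (m : Int) + 1) + 1 by push_cast; ring,
        PySem.List.pyRange_one_succ_right (by omega), List.foldl_append, ih, List.foldl_cons,
        List.foldl_nil]
      rw [show t - 1 + ((m + 1 : Nat) : Int) = (t - 1 + (m : Int)) + 1 by push_cast; ring]
      exact fwin_shift ht (by omega)

-- ===== VERDICT (by name: the statement is the Claim_ definition above) =====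
theorem seq_fib_spec : Claim_equal_seq_fib := by
  intro n t k _ _
  show seq_fib n t k = seq_fib_alt n t k
  by_cases h1 : n < t - 1
  · rw [seq_fib_base_lt h1, seq_fib_alt, if_pos h1]
  by_cases h2 : n = t - 1
  · subst h2
    rw [seq_fib_base_eq, seq_fib_alt, if_neg h1, if_pos rfl]
  by_cases h3 : t ≤ 0
  · rw [seq_fib, dif_neg h1, dif_neg h2, seq_fib_alt, if_neg h1, if_neg h2, if_pos h3,
      PySem.List.pyRange_one_eq_nil (by omega)]
    simp
  · have ht : 1 ≤ t := by omega
    have hn : t ≤ n := by omega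
    rw [seq_fib_alt, if_neg h1, if_neg h2, if_neg h3]
    have hm := loop_inv (k := k) ht (n - t + 1).toNat
    rw [show t - 1 + (((n - t + 1).toNat : Int)) = n by omega] at hm
    rw [hm]
    have hlast : fwin t k n
        = (PySem.List.pyRange (n + 1 - t) n 1).map (fun i => seq_fib i t k)
          ++ [seq_fib n t k] := by
      unfold fwin
      rw [PySem.List.pyRange_one_succ_right (by omega : n + 1 - t ≤ n), List.map_append,
        List.map_singleton]
    rw [hlast, PySem.List.pyGetD_neg_one_append_singleton]
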